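-- pv_equiv track=rewrite | github.com/josemontero-agv/descarga_masiva_Facturas_Guias | archive/09_descarga_guias_xml.py | buscar_pdf_eguia_agr
-- ===== SOURCE A (Python) =====
-- def buscar_pdf_eguia_agr(adjuntos):
--     """Buscar específicamente el PDF de 'e-Guía de Remisión AGR' entre los adjuntos"""
--     # Buscar por nombre que contenga indicadores del reporte AGR
--     for adj in adjuntos:
--         nombre = adj.get('name', '').lower()
--         descripcion = adj.get('description', '').lower() if adj.get('description') else ''
--
--         # Buscar PDF con indicadores de e-Guía AGR
--         if adj.get('mimetype') == 'application/pdf' or nombre.endswith('.pdf'):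
--             # Verificar si es el PDF de e-Guía
--             if any(keyword in nombre for keyword in ['e-guia', 'eguia', 'agr', 'remision', 'delivery']):
--                 return adj
--             if 'agr' in descripcion or 'e-guía' in descripcion:
--                 return adj
--
--     # Si no se encuentra específicamente, retornar el primer PDF
--     for adj in adjuntos:
--         if adj.get('mimetype') == 'application/pdf' or adj.get('name', '').lower().endswith('.pdf'):
--             return adj
--
--     return None
-- ===== SOURCE B (Python) =====
-- def buscar_pdf_eguia_agr(adjuntos):
--     """Single pass: return first keyword-matching PDF, carrying the first PDF as fallback."""
--     first_pdf = None
--     for adj in adjuntos: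
--         nombre = adj.get('name', '').lower()
--         if adj.get('mimetype') == 'application/pdf' or nombre.endswith('.pdf'):
--             descripcion = adj.get('description')
--             descripcion = descripcion.lower() if descripcion else ''
--             if (any(k in nombre for k in ('e-guia', 'eguia', 'agr', 'remision', 'delivery'))
--                     or 'agr' in descripcion or 'e-guía' in descripcion):
--                 return adj
--             if first_pdf is None:
--                 first_pdf = adj
--     return first_pdf
-- ===== Notes on version B (the rewrite author's own statement) =====
-- stated objective: simpler
-- what changed: Replaces A's two separate scans (keyword-matching PDF, then first PDF) by one pass that returns a matching PDF immediately and carries the first PDF seen as a fallback accumulator.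
import Mathlib
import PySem

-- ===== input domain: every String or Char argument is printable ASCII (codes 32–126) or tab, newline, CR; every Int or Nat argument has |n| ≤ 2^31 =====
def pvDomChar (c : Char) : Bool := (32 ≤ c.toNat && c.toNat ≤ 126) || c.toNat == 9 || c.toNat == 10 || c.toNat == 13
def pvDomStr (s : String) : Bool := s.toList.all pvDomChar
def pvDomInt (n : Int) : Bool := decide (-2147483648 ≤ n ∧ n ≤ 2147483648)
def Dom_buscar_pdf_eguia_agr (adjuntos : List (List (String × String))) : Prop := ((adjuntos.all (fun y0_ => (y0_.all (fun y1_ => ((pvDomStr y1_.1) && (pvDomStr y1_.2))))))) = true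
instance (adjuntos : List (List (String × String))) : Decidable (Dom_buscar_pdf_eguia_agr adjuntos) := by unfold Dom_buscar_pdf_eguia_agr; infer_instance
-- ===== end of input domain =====

-- B changes structure only (one pass with a first-PDF fallback accumulator instead of A's two scans); same result.

-- ===== PORT A =====
-- shared transliterations of the Python expressions
def pvNombre (adj : List (String × String)) : String :=
  PySem.Str.lower ((PySem.Dict.mk adj).getD "name" "")

def pvDescripcion (adj : List (String × String)) : String :=
  -- adj.get('description','').lower() if adj.get('description') else ''
  match (PySem.Dict.mk adj).get? "description" with
  | some d => if d ≠ "" then PySem.Str.lower ((PySem.Dict.mk adj).getD "description" "") else ""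
  | none => ""

def pvIsPdf (adj : List (String × String)) : Bool :=
  ((PySem.Dict.mk adj).get? "mimetype" == some "application/pdf")
    || PySem.Str.endswith (pvNombre adj) ".pdf"

def pvKwMatch (adj : List (String × String)) : Bool :=
  (["e-guia", "eguia", "agr", "remision", "delivery"].any
      (fun k => PySem.Str.isIn k (pvNombre adj)))

def pvDescMatch (adj : List (String × String)) : Bool :=
  PySem.Str.isIn "agr" (pvDescripcion adj) || PySem.Str.isIn "e-guía" (pvDescripcion adj)

-- first loop of A: first PDF whose name/description matches
def pvLoop1 : List (List (String × String)) → Option (List (String × String))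
  | [] => none
  | adj :: rest =>
    if pvIsPdf adj then
      if pvKwMatch adj then some adj
      else if pvDescMatch adj then some adj
      else pvLoop1 rest
    else pvLoop1 rest

-- second loop of A: first PDF
def pvLoop2 : List (List (String × String)) → Option (List (String × String))
  | [] => none
  | adj :: rest => if pvIsPdf adj then some adj else pvLoop2 rest

def buscar_pdf_eguia_agr (adjuntos : List (List (String × String))) : Option (List (String × String)) :=
  match pvLoop1 adjuntos with
  | some adj => some adj
  | none => pvLoop2 adjuntos

-- ===== PORT B =====
-- single pass carrying the first PDF seen as fallback
def pvAltLoop (firstPdf : Option (List (String × String))) :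
    List (List (String × String)) → Option (List (String × String))
  | [] => firstPdf
  | adj :: rest =>
    if pvIsPdf adj then
      if pvKwMatch adj || pvDescMatch adj then some adj
      else pvAltLoop (match firstPdf with | none => some adj | some f => some f) rest
    else pvAltLoop firstPdf rest

def buscar_pdf_eguia_agr_alt (adjuntos : List (List (String × String))) : Option (List (String × String)) :=
  pvAltLoop none adjuntos

-- ===== PRECONDITION & SPEC =====
def Spec_buscar_pdf_eguia_agr (adjuntos : List (List (String × String))) (out : Option (List (String × String))) : Prop := out = buscar_pdf_eguia_agr_alt adjuntos
instance (adjuntos : List (List (String × String))) (out : Option (List (String × String))) : Decidable (Spec_buscar_pdf_eguia_agr adjuntos out) := by unfold Spec_buscar_pdf_eguia_agr; infer_instance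

-- ===== CLAIM (what is proved, stated in full; the proofs are below) =====
def Claim_equal_buscar_pdf_eguia_agr : Prop := ∀ (adjuntos : List (List (String × String))), Dom_buscar_pdf_eguia_agr adjuntos → Spec_buscar_pdf_eguia_agr adjuntos (buscar_pdf_eguia_agr adjuntos)

-- ===== LEMMAS AND PROOFS =====
theorem pvAltLoop_eq (l : List (List (String × String))) :
    ∀ fb, pvAltLoop fb l =
      match pvLoop1 l with
      | some adj => some adj
      | none => match fb with
                | some f => some f
                | none => pvLoop2 l := by
  induction l with
  | nil => intro fb; cases fb <;> rfl
  | cons adj rest ih =>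
    intro fb
    simp only [pvAltLoop, pvLoop1, pvLoop2]
    by_cases hp : pvIsPdf adj
    · simp only [hp, if_true]
      by_cases hk : pvKwMatch adj
      · simp [hk]
      · by_cases hd : pvDescMatch adj
        · simp [hk, hd]
        · simp only [hk, hd, Bool.or_self]
          rw [ih]
          cases fb <;> cases h1 : pvLoop1 rest <;> simp
    · simp only [hp]
      exact ih fb

-- ===== VERDICT (by name: the statement is the Claim_ definition above) =====
theorem buscar_pdf_eguia_agr_spec : Claim_equal_buscar_pdf_eguia_agr := by
  intro adjuntos _
  unfold Spec_buscar_pdf_eguia_agr buscar_pdf_eguia_agr buscar_pdf_eguia_agr_alt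
  rw [pvAltLoop_eq]
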